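-- pv_equiv track=rewrite | github.com/frankikay/SOARES-ITMGT | advanced.py | eta
-- ===== SOURCE A (Python) =====
-- def eta(first_stop, second_stop, route_map):
--     '''ETA.
--     25 points.
--
--     A shuttle van service is tasked to travel along a predefined circlar route.
--     This route is divided into several legs between stops.
--     The route is one-way only, and it is fully connected to itself.
--
--     This function returns how long it will take the shuttle to arrive at a stop
--     after leaving another stop.
--
--     Please see `advanced_sample_data.py` for sample data. The route map will
--     adhere to the same pattern. The route map may contain more legs and more stops,
--     but it will always be one-way and fully enclosed.
--
--     Parameters
--     ----------
--     first_stop: str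
--         the stop that the shuttle will leave
--     second_stop: str
--         the stop that the shuttle will arrive at
--     route_map: dict
--         the data describing the routes
--
--     Returns
--     -------
--     int
--         the time it will take the shuttle to travel from first_stop to second_stop
--     '''
--     # Replace `pass` with your code.
--     # Stay within the function. Only use the parameters as input. The function should return your answer.
--
--     if first_stop == second_stop:
--         return 0
--
--     current_stop = first_stop
--     time_elapsed = 0
--
--     while current_stop != second_stop:
--         next_leg = None
--         for leg, info in route_map.items():
--             if leg[0] == current_stop:
--                 next_leg = leg
--                 break
--         if next_leg is None:
--             return None
--
--         time_elapsed += info["travel_time_mins"]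
--         current_stop = next_leg[1]
--
--     return time_elapsed
-- ===== SOURCE B (Python) =====
-- def eta(first_stop, second_stop, route_map):
--     # Consumes the route map: each traversed leg is removed from the working
--     # list, so every leg is used at most once and the loop terminates on every
--     # input (it falls off a cycle that misses the stop instead of spinning).
--     legs = list(route_map.items())
--     cur = first_stop
--     total = 0
--     while cur != second_stop:
--         for i in range(len(legs)):
--             leg, info = legs[i]
--             if leg[0] == cur:
--                 total += info["travel_time_mins"]
--                 cur = leg[1]
--                 legs.pop(i)
--                 break
--         else:
--             return None
--     return total
-- ===== Notes on version B (the rewrite author's own statement) =====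
-- stated objective: alternative
-- what changed: B consumes the route map: each traversed leg is removed from a working list, so every leg is used at most once, the scan shrinks as the walk proceeds, and the loop terminates on every input; A rescans the entire map on every step and diverges on cycles that miss the target stop.
import Mathlib
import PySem

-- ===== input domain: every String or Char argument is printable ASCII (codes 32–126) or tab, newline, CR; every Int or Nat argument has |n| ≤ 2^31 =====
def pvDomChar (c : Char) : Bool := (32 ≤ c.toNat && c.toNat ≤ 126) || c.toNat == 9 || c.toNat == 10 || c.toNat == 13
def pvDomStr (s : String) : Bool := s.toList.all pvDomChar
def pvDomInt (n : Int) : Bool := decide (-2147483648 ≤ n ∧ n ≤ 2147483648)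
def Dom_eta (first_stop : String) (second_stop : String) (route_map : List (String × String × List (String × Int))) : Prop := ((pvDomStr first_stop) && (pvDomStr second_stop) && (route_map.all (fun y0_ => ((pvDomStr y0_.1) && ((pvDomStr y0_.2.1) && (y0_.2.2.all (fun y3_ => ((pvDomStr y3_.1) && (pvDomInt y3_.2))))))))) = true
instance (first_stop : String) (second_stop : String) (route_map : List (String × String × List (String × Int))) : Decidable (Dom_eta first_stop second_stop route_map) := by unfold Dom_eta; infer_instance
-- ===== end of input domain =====

-- B consumes the route map (each traversed leg is removed, so every leg is used
-- at most once and the loop terminates on every input) instead of A's rescan of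
-- the full map on every step (objective: alternative).


-- ===== PORT A =====
-- the inner `for leg, info in route_map.items(): if leg[0] == current_stop: … break`
def etaFind (route_map : List (String × String × List (String × Int))) (cur : String) :
    Option (String × String × List (String × Int)) :=
  match route_map with
  | [] => none
  | e :: rest => if e.1 = cur then some e else etaFind rest cur

-- the `while current_stop != second_stop:` loop; fuel only makes it total: with
-- fuel = |route_map| + 1 it never runs out on any input admitted by Pre_eta
def etaLoop (second_stop : String) (route_map : List (String × String × List (String × Int)))
    (cur : String) (t : Int) : Nat → Option Int
  | 0 => none
  | fuel + 1 =>
    if cur = second_stop then some t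
    else
      match etaFind route_map cur with
      | none => none          -- `return None`
      | some e =>
        match PySem.Dict.get? (PySem.Dict.mk e.2.2) "travel_time_mins" with
        | none => none        -- KeyError in Python: excluded by Pre_eta
        | some tt => etaLoop second_stop route_map e.2.1 (t + tt) fuel

def eta (first_stop : String) (second_stop : String) (route_map : List (String × String × List (String × Int))) : Option Int :=
  if first_stop = second_stop then some 0
  else etaLoop second_stop route_map first_stop 0 (route_map.length + 1)

-- ===== PORT B =====
-- B's inner `for i in range(len(legs)): … legs.pop(i); break` / `else: return None`:
-- first leg out of `cur` together with the working list with that leg removed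
def pick (legs : List (String × String × List (String × Int))) (cur : String) :
    Option ((String × String × List (String × Int)) × List (String × String × List (String × Int))) :=
  match legs with
  | [] => none
  | e :: rest =>
    if e.1 = cur then some (e, rest)
    else (pick rest cur).map (fun p => (p.1, e :: p.2))

-- the removed leg makes the working list strictly shorter (cited by etaWalk's termination)
theorem pick_length (legs : List (String × String × List (String × Int))) (cur : String)
    (e : String × String × List (String × Int))
    (rest : List (String × String × List (String × Int))) :
    pick legs cur = some (e, rest) → rest.length < legs.length := by
  induction legs generalizing e rest with
  | nil => intro h; simp [pick] at h
  | cons f r ih =>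
    intro h
    simp only [pick] at h
    split at h
    · cases h; simp
    · cases hp : pick r cur with
      | none => rw [hp] at h; simp at h
      | some p =>
        rw [hp] at h
        simp only [Option.map_some] at h
        cases h
        have := ih p.1 p.2 hp
        simp only [List.length_cons]
        omega

-- B's `while cur != second_stop:` loop over the shrinking working list
def etaWalk (second_stop : String) (cur : String) (total : Int)
    (legs : List (String × String × List (String × Int))) : Option Int :=
  if cur = second_stop then some total
  else
    match h : pick legs cur with
    | none => none            -- the for-loop's `else: return None`
    | some (e, keep) =>
      match PySem.Dict.get? (PySem.Dict.mk e.2.2) "travel_time_mins" with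
      | none => none          -- KeyError in Python: excluded by Pre_eta
      | some tt => etaWalk second_stop e.2.1 (total + tt) keep
termination_by legs.length
decreasing_by exact pick_length _ _ _ _ h

def eta_alt (first_stop : String) (second_stop : String) (route_map : List (String × String × List (String × Int))) : Option Int :=
  etaWalk second_stop first_stop 0 route_map

-- ===== PRECONDITION & SPEC =====
-- the first leg out of a stop (used only to state Pre_eta)
def pvNext (route_map : List (String × String × List (String × Int))) (cur : String) :
    Option (String × String × List (String × Int)) :=
  route_map.find? (fun e => e.1 = cur)

-- Reachability in the successor graph (pvNext): does `second_stop` or a sink lie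
-- within `n` steps of `cur`, every traversed leg's info carrying "travel_time_mins"?
-- This decides a reachability property of the INPUT graph only — it computes no
-- travel time and is not either port's recursion; A's normal return is inherently
-- a reachability condition (its while-loop diverges on unreachable targets), so no
-- iteration-free statement of it exists.
def pvOk (route_map : List (String × String × List (String × Int))) (second_stop : String) :
    String → Nat → Bool
  | _, 0 => false
  | cur, n + 1 =>
    if cur = second_stop then true
    else
      match pvNext route_map cur with
      | none => true
      | some e =>
        (PySem.Dict.get? (PySem.Dict.mk e.2.2) "travel_time_mins").isSome
          && pvOk route_map second_stop e.2.1 n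

-- Pre_ admits exactly the inputs on which A returns normally: it excludes those where
-- A raises KeyError (a traversed leg's info lacks "travel_time_mins") and those where
-- A's while-loop never terminates (a cycle not containing second_stop); the walk is
-- deterministic and revisit-free when it terminates, so |route_map| + 1 steps suffice.
def Pre_eta (first_stop : String) (second_stop : String) (route_map : List (String × String × List (String × Int))) : Prop :=
  first_stop = second_stop ∨ pvOk route_map second_stop first_stop (route_map.length + 1) = true
instance (first_stop : String) (second_stop : String) (route_map : List (String × String × List (String × Int))) : Decidable (Pre_eta first_stop second_stop route_map) := by unfold Pre_eta; infer_instance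

def pvWitness_eta : String × String × (List (String × String × List (String × Int))) :=
  ("a", "c", [("a", "b", [("travel_time_mins", 5)]), ("b", "c", [("travel_time_mins", 7)]), ("c", "a", [("travel_time_mins", 2)])])

def Spec_eta (first_stop : String) (second_stop : String) (route_map : List (String × String × List (String × Int))) (out : Option Int) : Prop := out = eta_alt first_stop second_stop route_map
instance (first_stop : String) (second_stop : String) (route_map : List (String × String × List (String × Int))) (out : Option Int) : Decidable (Spec_eta first_stop second_stop route_map out) := by unfold Spec_eta; infer_instance

-- ===== CLAIM (what is proved, stated in full; the proofs are below) =====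
def Claim_equal_eta : Prop := ∀ (first_stop : String) (second_stop : String) (route_map : List (String × String × List (String × Int))), Dom_eta first_stop second_stop route_map → Pre_eta first_stop second_stop route_map → Spec_eta first_stop second_stop route_map (eta first_stop second_stop route_map)

-- ===== LEMMAS AND PROOFS =====

theorem etaFind_eq_pvNext (legs : List (String × String × List (String × Int))) (cur : String) :
    etaFind legs cur = pvNext legs cur := by
  induction legs with
  | nil => rfl
  | cons e r ih => simp [etaFind, pvNext, List.find?]; split_ifs with h <;> simp_all [pvNext]

-- position after n steps of the walk (none = terminated before n steps)
def pvStep (route_map : List (String × String × List (String × Int))) (second_stop : String) :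
    String → Nat → Option String
  | cur, 0 => some cur
  | cur, n + 1 =>
    if cur = second_stop then none
    else
      match pvNext route_map cur with
      | none => none
      | some e => pvStep route_map second_stop e.2.1 n

-- the stops the walk occupies (strictly before terminating) within n steps
def pvTrace (route_map : List (String × String × List (String × Int))) (second_stop : String) :
    String → Nat → List String
  | _, 0 => []
  | cur, n + 1 =>
    if cur = second_stop then []
    else
      cur :: (match pvNext route_map cur with
              | none => []
              | some e => pvTrace route_map second_stop e.2.1 n)

theorem pvStep_add (route_map : List (String × String × List (String × Int))) (second_stop : String)
    (a b : Nat) : ∀ cur, pvStep route_map second_stop cur (a + b)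
      = (pvStep route_map second_stop cur a).bind (fun c => pvStep route_map second_stop c b) := by
  induction a with
  | zero => intro cur; simp [pvStep]
  | succ n ih =>
    intro cur
    rw [Nat.succ_add]
    simp only [pvStep]
    split_ifs with h
    · rfl
    · cases pvNext route_map cur with
      | none => rfl
      | some e => exact ih e.2.1

theorem pvStep_prefix (route_map : List (String × String × List (String × Int))) (second_stop : String)
    (cur : String) (m n : Nat) (c : String)
    (h : pvStep route_map second_stop cur n = some c) (hmn : m ≤ n) :
    (pvStep route_map second_stop cur m).isSome := by
  have : n = m + (n - m) := by omega
  rw [this, pvStep_add] at h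
  cases hm : pvStep route_map second_stop cur m with
  | none => rw [hm] at h; simp at h
  | some d => simp

theorem pvOk_step_none (route_map : List (String × String × List (String × Int))) (second_stop : String) :
    ∀ (n : Nat) (cur : String), pvOk route_map second_stop cur n = true →
      pvStep route_map second_stop cur n = none := by
  intro n
  induction n with
  | zero => intro cur h; simp [pvOk] at h
  | succ n ih =>
    intro cur h
    simp only [pvOk] at h
    simp only [pvStep]
    split_ifs with hc
    · rfl
    · rw [if_neg hc] at h
      cases hn : pvNext route_map cur with
      | none => rfl
      | some e =>
        rw [hn] at h
        simp only [Bool.and_eq_true] at h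
        exact ih e.2.1 h.2

theorem pvStep_pump (route_map : List (String × String × List (String × Int))) (second_stop : String)
    (cur : String) (k : Nat) (h : pvStep route_map second_stop cur k = some cur) :
    ∀ m, pvStep route_map second_stop cur (m * k) = some cur := by
  intro m
  induction m with
  | zero => simp [pvStep]
  | succ n ih =>
    have : (n + 1) * k = n * k + k := by ring
    rw [this, pvStep_add, ih]
    simpa using h

theorem pvTrace_mem (route_map : List (String × String × List (String × Int))) (second_stop : String) :
    ∀ (m : Nat) (s c : String), c ∈ pvTrace route_map second_stop s m →
      ∃ k, k < m ∧ pvStep route_map second_stop s k = some c ∧ c ≠ second_stop := by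
  intro m
  induction m with
  | zero => intro s c h; simp [pvTrace] at h
  | succ n ih =>
    intro s c h
    simp only [pvTrace] at h
    split_ifs at h with hs
    · simp at h
    · rcases List.mem_cons.mp h with hc | hc
      · exact ⟨0, by omega, by simp [pvStep, hc], by rw [hc]; exact hs⟩
      · cases hn : pvNext route_map s with
        | none => rw [hn] at hc; simp at hc
        | some e =>
          rw [hn] at hc
          obtain ⟨k, hk, hstep, hne⟩ := ih e.2.1 c hc
          refine ⟨k + 1, by omega, ?_, hne⟩
          simp [pvStep, hs, hn, hstep]

-- a terminating walk never returns to its current stop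
theorem pv_no_revisit (route_map : List (String × String × List (String × Int))) (second_stop : String)
    (cur : String) (n : Nat) (e : String × String × List (String × Int))
    (hOk : pvOk route_map second_stop cur (n + 1) = true)
    (hne : cur ≠ second_stop) (hnx : pvNext route_map cur = some e) :
    cur ∉ pvTrace route_map second_stop e.2.1 n := by
  intro hmem
  obtain ⟨k, hk, hstep, -⟩ := pvTrace_mem route_map second_stop n e.2.1 cur hmem
  have hcyc : pvStep route_map second_stop cur (k + 1) = some cur := by
    have : k + 1 = 1 + k := by omega
    rw [this, pvStep_add]
    simp [pvStep, hne, hnx, hstep]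
  have hpump := pvStep_pump route_map second_stop cur (k + 1) hcyc (n + 1)
  have hle : n + 1 ≤ (n + 1) * (k + 1) := Nat.le_mul_of_pos_right _ (by omega)
  have hsome := pvStep_prefix route_map second_stop cur (n + 1) ((n + 1) * (k + 1)) cur hpump hle
  rw [pvOk_step_none route_map second_stop (n + 1) cur hOk] at hsome
  simp at hsome

theorem pick_fst (legs : List (String × String × List (String × Int))) (cur : String) :
    (pick legs cur).map Prod.fst = etaFind legs cur := by
  induction legs with
  | nil => rfl
  | cons e r ih =>
    simp only [pick, etaFind]
    split_ifs with h
    · rfl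
    · rw [← ih, Option.map_map]; rfl

theorem pick_rest_find (legs : List (String × String × List (String × Int))) (cur : String)
    (e : String × String × List (String × Int))
    (rest : List (String × String × List (String × Int)))
    (h : pick legs cur = some (e, rest)) :
    ∀ c, c ≠ cur → etaFind rest c = etaFind legs c := by
  induction legs generalizing e rest with
  | nil => simp [pick] at h
  | cons f r ih =>
    simp only [pick] at h
    split_ifs at h with hf
    · cases h
      intro c hc
      simp only [etaFind]
      rw [if_neg (by rw [hf]; exact fun hh => hc hh.symm)]
    · cases hp : pick r cur with
      | none => rw [hp] at h; simp at h
      | some p =>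
        rw [hp] at h
        simp only [Option.map_some] at h
        cases h
        intro c hc
        simp only [etaFind]
        split_ifs with hf2
        · rfl
        · exact ih p.1 p.2 hp c hc

-- one-step unfolding of etaWalk as a plain (non-dependent) match
theorem etaWalk_unfold (second_stop cur : String) (total : Int)
    (legs : List (String × String × List (String × Int))) :
    etaWalk second_stop cur total legs =
      if cur = second_stop then some total
      else
        match pick legs cur with
        | none => none
        | some (e, keep) =>
          match PySem.Dict.get? (PySem.Dict.mk e.2.2) "travel_time_mins" with
          | none => none
          | some tt => etaWalk second_stop e.2.1 (total + tt) keep := by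
  rw [etaWalk]
  split_ifs with h
  · rfl
  · split
    · next heq => rw [heq]
    · next e keep heq => rw [heq]

-- A's loop over the full map equals B's walk over any working list that still
-- agrees with the map along the remaining trajectory
theorem loop_eq (route_map : List (String × String × List (String × Int))) (second_stop : String) :
    ∀ (fuel : Nat) (cur : String) (legs : List (String × String × List (String × Int))) (t : Int),
      pvOk route_map second_stop cur fuel = true →
      (∀ c ∈ pvTrace route_map second_stop cur fuel, etaFind legs c = etaFind route_map c) →
      etaLoop second_stop route_map cur t fuel = etaWalk second_stop cur t legs := by
  intro fuel
  induction fuel with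
  | zero => intro cur legs t h _; simp [pvOk] at h
  | succ n ih =>
    intro cur legs t hOk hinv
    by_cases hc : cur = second_stop
    · rw [etaWalk_unfold]
      simp [etaLoop, hc]
    · have hcur : cur ∈ pvTrace route_map second_stop cur (n + 1) := by
        simp [pvTrace, hc]
      have hfind : etaFind legs cur = etaFind route_map cur := hinv cur hcur
      rw [etaWalk_unfold, if_neg hc]
      simp only [etaLoop, if_neg hc]
      cases hn : etaFind route_map cur with
      | none =>
        have : pick legs cur = none := by
          have := pick_fst legs cur
          rw [hfind, hn] at this
          cases hp : pick legs cur with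
          | none => rfl
          | some p => rw [hp] at this; simp at this
        rw [this]
      | some e =>
        have hnx : pvNext route_map cur = some e := by rw [← etaFind_eq_pvNext, hn]
        have hpick : ∃ rest, pick legs cur = some (e, rest) := by
          have := pick_fst legs cur
          rw [hfind, hn] at this
          cases hp : pick legs cur with
          | none => rw [hp] at this; simp at this
          | some p =>
            obtain ⟨e', rest'⟩ := p
            rw [hp] at this
            simp only [Option.map_some, Option.some.injEq] at this
            exact ⟨rest', by rw [this]⟩
        obtain ⟨rest, hp⟩ := hpick
        rw [hp]
        dsimp only
        have hOk' := hOk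
        simp only [pvOk, if_neg hc, hnx] at hOk'
        cases hd : PySem.Dict.get? (PySem.Dict.mk e.2.2) "travel_time_mins" with
        | none => simp [hd] at hOk'
        | some tt =>
          rw [hd] at hOk'
          simp only [Option.isSome_some, Bool.true_and] at hOk'
          have hnr := pv_no_revisit route_map second_stop cur n e hOk hc hnx
          apply ih e.2.1 rest (t + tt) hOk'
          intro c hcmem
          have hcne : c ≠ cur := fun hh => hnr (hh ▸ hcmem)
          rw [pick_rest_find legs cur e rest hp c hcne]
          apply hinv
          simp [pvTrace, hc, hnx]
          right; exact hcmem

-- ===== VERDICT (by name: the statement is the Claim_ definition above) =====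
theorem eta_spec : Claim_equal_eta := by
  intro first_stop second_stop route_map _ hpre
  unfold Spec_eta eta eta_alt
  by_cases hc : first_stop = second_stop
  · rw [etaWalk_unfold]
    simp [hc]
  · rw [if_neg hc]
    rcases hpre with h | h
    · exact absurd h hc
    · exact loop_eq route_map second_stop (route_map.length + 1) first_stop route_map 0 h
        (fun c _ => rfl)
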